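-- pv_equiv track=rewrite | github.com/neeeal/MSCS-TIPQC | MCSCC 163/FINAL_PROJECT/transformer_nmt_final_project.py | create_synthetic_dataset
-- ===== SOURCE A (Python) =====
-- def create_synthetic_dataset(num_samples=50000):
--     """
--     Create a synthetic dataset for demonstration purposes.
--     In a real scenario, this would be replaced with actual Filipino-Chinese parallel data.
--     """
--     # Example Filipino sentences (simplified for demonstration)
--     filipino_examples = [
--         "Magandang umaga po.",
--         "Kumusta ka?",
--         "Salamat sa tulong mo.",
--         "Paalam na.",
--         "Gusto ko ng kape.",
--         "Saan ang banyo?",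
--         "Anong oras na?",
--         "Mahal kita.",
--         "Masaya ako.",
--         "Malungkot ako."
--     ]
--
--     # Corresponding Chinese translations
--     chinese_examples = [
--         "早上好。",
--         "你好吗？",
--         "谢谢你的帮助。",
--         "再见。",
--         "我想要咖啡。",
--         "洗手间在哪里？",
--         "现在几点了？",
--         "我爱你。",
--         "我很开心。",
--         "我很伤心。"
--     ]
--
--     # Generate synthetic dataset by repeating and modifying examples
--     filipino_data = []
--     chinese_data = []
--
--     for i in range(num_samples):
--         base_idx = i % len(filipino_examples)
--         variation = f" ({i//len(filipino_examples) + 1})"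
--
--         filipino_sent = filipino_examples[base_idx] + variation
--         chinese_sent = chinese_examples[base_idx] + variation
--
--         filipino_data.append(filipino_sent)
--         chinese_data.append(chinese_sent)
--
--     return filipino_data, chinese_data
-- ===== SOURCE B (Python) =====
-- def create_synthetic_dataset(num_samples=50000):
--     """
--     Create a synthetic dataset for demonstration purposes.
--     Round-based construction: emit whole numbered rounds of the example
--     lists, then one truncated final round, instead of per-item modular
--     indexing.
--     """
--     filipino_examples = [
--         "Magandang umaga po.",
--         "Kumusta ka?",
--         "Salamat sa tulong mo.",
--         "Paalam na.",
--         "Gusto ko ng kape.",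
--         "Saan ang banyo?",
--         "Anong oras na?",
--         "Mahal kita.",
--         "Masaya ako.",
--         "Malungkot ako."
--     ]
--     chinese_examples = [
--         "早上好。",
--         "你好吗？",
--         "谢谢你的帮助。",
--         "再见。",
--         "我想要咖啡。",
--         "洗手间在哪里？",
--         "现在几点了？",
--         "我爱你。",
--         "我很开心。",
--         "我很伤心。"
--     ]
--     filipino_data = []
--     chinese_data = []
--     n = max(0, num_samples)
--     full_rounds, remainder = divmod(n, len(filipino_examples))
--     for rep in range(full_rounds):
--         filipino_data.extend(f"{s} ({rep + 1})" for s in filipino_examples)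
--         chinese_data.extend(f"{s} ({rep + 1})" for s in chinese_examples)
--     if remainder:
--         filipino_data.extend(f"{s} ({full_rounds + 1})" for s in filipino_examples[:remainder])
--         chinese_data.extend(f"{s} ({full_rounds + 1})" for s in chinese_examples[:remainder])
--     return filipino_data, chinese_data
-- ===== Notes on version B (the rewrite author's own statement) =====
-- stated objective: alternative
-- what changed: Replaces the flat per-item loop, which computes a modular base index and a floor-divided round number for every item, by a round-based construction: divmod yields the number of full rounds and the remainder, each full round extends the output with the whole tagged example lists, and one truncated final round built from a slice handles the remainder.
import Mathlib
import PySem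

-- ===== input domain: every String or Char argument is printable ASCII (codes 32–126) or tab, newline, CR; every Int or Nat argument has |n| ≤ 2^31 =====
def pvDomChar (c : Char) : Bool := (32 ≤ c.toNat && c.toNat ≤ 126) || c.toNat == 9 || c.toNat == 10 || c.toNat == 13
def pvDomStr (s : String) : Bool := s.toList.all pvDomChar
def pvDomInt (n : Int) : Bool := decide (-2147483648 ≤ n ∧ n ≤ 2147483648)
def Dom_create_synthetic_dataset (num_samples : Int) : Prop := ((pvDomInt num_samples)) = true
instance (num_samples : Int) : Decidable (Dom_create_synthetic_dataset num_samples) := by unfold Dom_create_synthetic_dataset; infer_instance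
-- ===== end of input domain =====

-- B builds the dataset round by round (divmod + whole-list tagging + truncated last round)
-- instead of A's flat loop with per-item i%10 / i//10; same output, alternative decomposition.

-- ===== PORT A =====
-- the two constant example lists (shared module data of both versions)
def pvFil : List String :=
  ["Magandang umaga po.", "Kumusta ka?", "Salamat sa tulong mo.", "Paalam na.",
   "Gusto ko ng kape.", "Saan ang banyo?", "Anong oras na?", "Mahal kita.",
   "Masaya ako.", "Malungkot ako."]
def pvChi : List String :=
  ["早上好。", "你好吗？", "谢谢你的帮助。", "再见。", "我想要咖啡。",
   "洗手间在哪里？", "现在几点了？", "我爱你。", "我很开心。", "我很伤心。"]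

def create_synthetic_dataset (num_samples : Int) : List String × List String :=
  let filipino_examples := pvFil
  let chinese_examples := pvChi
  (PySem.List.pyRange 0 num_samples 1).foldl
    (fun (acc : List String × List String) i =>
      let base_idx := PySem.Int.mod i (filipino_examples.length : Int)
      let variation := " (" ++ PySem.Int.toStr (PySem.Int.floordiv i (filipino_examples.length : Int) + 1) ++ ")"
      -- list indexing is exact here: 0 ≤ base_idx < 10, so pyGetD never takes its default
      let filipino_sent := PySem.List.pyGetD filipino_examples base_idx "" ++ variation
      let chinese_sent := PySem.List.pyGetD chinese_examples base_idx "" ++ variation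
      (acc.1 ++ [filipino_sent], acc.2 ++ [chinese_sent]))
    ([], [])

-- ===== PORT B =====
def create_synthetic_dataset_alt (num_samples : Int) : List String × List String :=
  let filipino_examples := pvFil
  let chinese_examples := pvChi
  let n := max 0 num_samples
  let full_rounds := PySem.Int.floordiv n (filipino_examples.length : Int)
  let remainder := PySem.Int.mod n (filipino_examples.length : Int)
  let acc := (PySem.List.pyRange 0 full_rounds 1).foldl
    (fun (acc : List String × List String) rep =>
      (acc.1 ++ filipino_examples.map (fun s => s ++ " (" ++ PySem.Int.toStr (rep + 1) ++ ")"),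
       acc.2 ++ chinese_examples.map (fun s => s ++ " (" ++ PySem.Int.toStr (rep + 1) ++ ")")))
    ([], [])
  if remainder ≠ 0 then
    let variation := " (" ++ PySem.Int.toStr (full_rounds + 1) ++ ")"
    -- 0 ≤ remainder < 10, so the Python slice xs[:remainder] is List.take remainder.toNat (exact)
    (acc.1 ++ (filipino_examples.take remainder.toNat).map (· ++ variation),
     acc.2 ++ (chinese_examples.take remainder.toNat).map (· ++ variation))
  else acc

-- ===== PRECONDITION & SPEC =====
def Spec_create_synthetic_dataset (num_samples : Int) (out : List String × List String) : Prop := out = create_synthetic_dataset_alt num_samples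
instance (num_samples : Int) (out : List String × List String) : Decidable (Spec_create_synthetic_dataset num_samples out) := by unfold Spec_create_synthetic_dataset; infer_instance

-- ===== CLAIM (what is proved, stated in full; the proofs are below) =====
def Claim_equal_create_synthetic_dataset : Prop := ∀ (num_samples : Int), Dom_create_synthetic_dataset num_samples → Spec_create_synthetic_dataset num_samples (create_synthetic_dataset num_samples)

-- ===== LEMMAS AND PROOFS =====

/-- the tag " (t)" appended in both versions -/
def pvTag (t : Int) : String := " (" ++ PySem.Int.toStr t ++ ")"

/-- per-item value of A's loop body for the example list `xs` -/
def pvItem (xs : List String) (i : Int) : String :=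
  PySem.List.pyGetD xs (PySem.Int.mod i 10) "" ++ pvTag (PySem.Int.floordiv i 10 + 1)

/-- one full round of B for the example list `xs` -/
def pvRound (xs : List String) (rep : Int) : List String := xs.map (· ++ pvTag (rep + 1))

lemma foldA_eq (l : List Int) (p : List String × List String) :
    l.foldl
      (fun (acc : List String × List String) i =>
        (acc.1 ++ [pvItem pvFil i], acc.2 ++ [pvItem pvChi i])) p
    = (p.1 ++ l.map (pvItem pvFil), p.2 ++ l.map (pvItem pvChi)) := by
  induction l generalizing p with
  | nil => simp
  | cons a l ih => simp [List.foldl_cons, ih]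

lemma foldB_eq (l : List Int) (p : List String × List String) :
    l.foldl
      (fun (acc : List String × List String) rep =>
        (acc.1 ++ pvFil.map (fun s => s ++ " (" ++ PySem.Int.toStr (rep + 1) ++ ")"),
         acc.2 ++ pvChi.map (fun s => s ++ " (" ++ PySem.Int.toStr (rep + 1) ++ ")"))) p
    = (p.1 ++ l.flatMap (pvRound pvFil), p.2 ++ l.flatMap (pvRound pvChi)) := by
  induction l generalizing p with
  | nil => simp
  | cons a l ih => rw [List.foldl_cons, ih]; simp [pvRound, pvTag, String.append_assoc]

lemma pvFil_len : ((pvFil.length : Nat) : Int) = 10 := rfl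

lemma map_pyGetD_range_take (xs : List String) (r : Nat) (hr : r ≤ xs.length) :
    (List.range r).map (fun (k : Nat) => PySem.List.pyGetD xs (k : Int) "") = xs.take r := by
  induction r with
  | zero => simp
  | succ r ih =>
    rw [List.range_succ, List.map_append, ih (by omega), List.take_add_one]
    have h : r < xs.length := by omega
    simp [List.getD_eq_getElem?_getD, List.getElem?_eq_getElem h]

lemma remPart (xs : List String) (hlen : xs.length = 10) (q r : Int)
    (_hq : 0 ≤ q) (hr : 0 ≤ r) (hr' : r ≤ 10) :
    (PySem.List.pyRange (10*q) (10*q + r) 1).map (pvItem xs)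
      = (xs.take r.toNat).map (· ++ pvTag (q + 1)) := by
  have hsplit : PySem.List.pyRange (10*q) (10*q + r) 1
      = (List.range r.toNat).map (fun (k : Nat) => 10*q + (k : Int)) := by
    rw [PySem.List.pyRange_one, show ((10*q + r) - 10*q).toNat = r.toNat from by omega]
  calc (PySem.List.pyRange (10*q) (10*q + r) 1).map (pvItem xs)
      = (List.range r.toNat).map (fun (k : Nat) => pvItem xs (10*q + (k : Int))) := by
        rw [hsplit, List.map_map]; rfl
    _ = (List.range r.toNat).map (fun (k : Nat) => PySem.List.pyGetD xs (k : Int) "" ++ pvTag (q + 1)) := by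
        refine List.map_congr_left ?_
        intro k hk
        have hk10 : (k : Int) < 10 := by
          have := List.mem_range.mp hk; omega
        have hmod : PySem.Int.mod (10*q + (k : Int)) 10 = (k : Int) := by
          rw [PySem.Int.mod_eq_emod_of_pos (by omega)]; omega
        have hdiv : PySem.Int.floordiv (10*q + (k : Int)) 10 = q := by
          rw [PySem.Int.floordiv_eq_ediv_of_pos (by omega)]; omega
        unfold pvItem
        rw [hmod, hdiv]
    _ = ((List.range r.toNat).map (fun (k : Nat) => PySem.List.pyGetD xs (k : Int) "")).map (· ++ pvTag (q + 1)) := by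
        rw [List.map_map]; rfl
    _ = (xs.take r.toNat).map (· ++ pvTag (q + 1)) := by
        rw [map_pyGetD_range_take xs r.toNat (by omega)]

lemma fullRounds (xs : List String) (hlen : xs.length = 10) (q : Nat) :
    (PySem.List.pyRange 0 (10*(q:Int)) 1).map (pvItem xs)
      = (PySem.List.pyRange 0 (q:Int) 1).flatMap (pvRound xs) := by
  induction q with
  | zero =>
    simp [PySem.List.pyRange_one_eq_nil (le_refl (0:Int))]
  | succ q ih =>
    have e : (10:Int)*((q+1 : Nat) : Int) = 10*(q:Int) + 10 := by push_cast; ring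
    have e2 : ((q+1 : Nat) : Int) = (q:Int) + 1 := by push_cast; ring
    rw [e, e2,
      PySem.List.pyRange_one_append 0 (10*(q:Int)) (10*(q:Int)+10) (by positivity) (by omega),
      List.map_append, ih,
      PySem.List.pyRange_one_succ_right (by positivity),
      List.flatMap_append]
    congr 1
    have := remPart xs hlen (q:Int) 10 (by positivity) (by norm_num) (le_refl 10)
    rw [show 10*(q:Int)+10 = 10*(q:Int) + (10:Int) from rfl, this]
    simp [pvRound, List.take_of_length_le (le_of_eq hlen)]

lemma mapSide (xs : List String) (hlen : xs.length = 10) (n : Int) (hn : 0 ≤ n) :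
    (PySem.List.pyRange 0 n 1).map (pvItem xs)
      = (PySem.List.pyRange 0 (PySem.Int.floordiv n 10) 1).flatMap (pvRound xs)
        ++ (xs.take (PySem.Int.mod n 10).toNat).map (· ++ pvTag (PySem.Int.floordiv n 10 + 1)) := by
  have hfd : PySem.Int.floordiv n 10 = n / 10 := PySem.Int.floordiv_eq_ediv_of_pos (by omega)
  have hmd : PySem.Int.mod n 10 = n % 10 := PySem.Int.mod_eq_emod_of_pos (by omega)
  rw [hfd, hmd]
  obtain ⟨q, hq⟩ : ∃ q : Nat, n / 10 = (q : Int) := ⟨(n / 10).toNat, by omega⟩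
  obtain ⟨r, hr0, hr10, hnr, hmr⟩ :
      ∃ r : Int, 0 ≤ r ∧ r < 10 ∧ n = 10*(q:Int) + r ∧ n % 10 = r :=
    ⟨n % 10, by omega, by omega, by omega, rfl⟩
  rw [hq, hmr,
    PySem.List.pyRange_one_append 0 (10*(q:Int)) n (by positivity) (by omega),
    List.map_append, fullRounds xs hlen q]
  congr 1
  rw [show n = 10*(q:Int) + r from hnr, remPart xs hlen (q:Int) r (by positivity) hr0 (by omega)]

lemma A_char (n : Int) : create_synthetic_dataset n
    = ([] ++ (PySem.List.pyRange 0 n 1).map (pvItem pvFil),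
       [] ++ (PySem.List.pyRange 0 n 1).map (pvItem pvChi)) :=
  foldA_eq (PySem.List.pyRange 0 n 1) ([], [])

lemma main_eq (n : Int) : create_synthetic_dataset n = create_synthetic_dataset_alt n := by
  rw [A_char n]
  simp only [create_synthetic_dataset_alt, pvFil_len]
  rw [foldB_eq]
  by_cases hn : 0 ≤ n
  · have hmax : max 0 n = n := by omega
    rw [hmax, mapSide pvFil rfl n hn, mapSide pvChi rfl n hn]
    by_cases hr : PySem.Int.mod n 10 = 0
    · rw [if_neg (not_not_intro hr)]
      have hr' : n % 10 = 0 := by rwa [PySem.Int.mod_eq_emod_of_pos (by omega)] at hr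
      simp [hr']
    · rw [if_pos hr]
      simp [pvTag, String.append_assoc]
  · have hmax : max 0 n = 0 := by omega
    have h0 : PySem.List.pyRange 0 n 1 = [] := PySem.List.pyRange_one_eq_nil (by omega)
    have hd : PySem.Int.floordiv 0 10 = 0 := by decide
    have hm : PySem.Int.mod 0 10 = 0 := by decide
    rw [hmax]
    simp [h0, PySem.List.pyRange_one_eq_nil (le_refl (0:Int))]

-- ===== VERDICT (by name: the statement is the Claim_ definition above) =====
theorem create_synthetic_dataset_spec : Claim_equal_create_synthetic_dataset := by
  intro n _
  exact main_eq n
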